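-- pv_equiv track=rewrite | github.com/m1sterzer0/DaveProgrammingCompetitions | hackercup/python/2015/1_C.py | solveStressFree
-- ===== SOURCE A (Python) =====
-- MOD = 1_000_000_007
--
-- def solveStressFree(A,B) :
--     dp = [0] * (B+1); dp[0] = 1
--     ndp = [0] * (B+1)
--     for myscore in range(1,A+1) :
--         for i in range(B+1) : ndp[i] = 0
--         for oppscore in range(B+1) :
--             if oppscore >= myscore : break
--             if oppscore+1 < myscore and oppscore < B: dp[oppscore+1] += dp[oppscore]; dp[oppscore+1] %= MOD
--             ndp[oppscore] += dp[oppscore]; ndp[oppscore] %= MOD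
--         if myscore < A : dp,ndp = ndp,dp
--     return dp[B]
-- ===== SOURCE B (Python) =====
-- MOD = 1_000_000_007
--
-- def solveStressFree(A, B):
--     # column-wise prefix-sum dp over the opponent's score (O(A*B), one array, no swaps)
--     if B == 0:
--         return 1
--     if A <= B:
--         return 0
--     col = [1] * (A + 1)          # col[m] = ways when the opponent has scored 0
--     for j in range(1, B + 1):
--         s = 0
--         for m in range(j + 1, A + 1):
--             s = (s + col[m]) % MOD
--             col[m] = s
--     return col[A]
-- ===== Notes on version B (the rewrite author's own statement) =====
-- stated objective: faster
-- what changed: Replaced A's row-by-row double-buffer dp (per-round ndp reset, in-place prefix accumulation with a break, and buffer swapping) by a single-array column-wise prefix-sum dp over the opponent's score, with the trivial cases B==0 and A<=B returned in closed form.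
import Mathlib
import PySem

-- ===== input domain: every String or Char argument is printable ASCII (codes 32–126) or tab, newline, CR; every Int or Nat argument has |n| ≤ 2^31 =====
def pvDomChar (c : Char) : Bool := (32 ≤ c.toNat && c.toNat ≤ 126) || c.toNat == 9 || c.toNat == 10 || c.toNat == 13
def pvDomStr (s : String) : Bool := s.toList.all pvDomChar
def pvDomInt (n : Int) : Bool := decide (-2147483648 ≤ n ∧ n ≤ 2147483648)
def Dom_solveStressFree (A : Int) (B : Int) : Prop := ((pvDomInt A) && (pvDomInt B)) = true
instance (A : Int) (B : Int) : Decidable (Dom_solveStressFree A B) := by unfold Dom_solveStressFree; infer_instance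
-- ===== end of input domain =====

-- B replaces A's two-buffer row dp (reset/accumulate/swap) by a single-array column-wise
-- prefix-sum dp; measurably faster by a constant factor, same O(A*B) asymptotics.

def pvMOD : Int := 1000000007

-- ===== PORT A =====
-- inner 'for oppscore in range(B+1)' loop with its break, updating dp in place and filling ndp
def pvAinner : List Int → Int → Int → List Int → List Int → List Int × List Int
  | [], _, _, dp, ndp => (dp, ndp)
  | o :: rest, m, B, dp, ndp =>
    if m ≤ o then (dp, ndp)      -- 'if oppscore >= myscore : break'
    else
      let dp' := if o + 1 < m ∧ o < B then
          PySem.List.pySetD dp (o+1)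
            ((PySem.List.pyGetD dp (o+1) 0 + PySem.List.pyGetD dp o 0) % pvMOD)
        else dp
      let ndp' := PySem.List.pySetD ndp o
          ((PySem.List.pyGetD ndp o 0 + PySem.List.pyGetD dp' o 0) % pvMOD)
      pvAinner rest m B dp' ndp'

def solveStressFree (A : Int) (B : Int) : Int :=
  let dp := PySem.List.pySetD (List.replicate (B+1).toNat 0) 0 1
  let ndp := List.replicate (B+1).toNat 0
  let st := (PySem.List.pyRange 1 (A+1) 1).foldl
    (fun (st : List Int × List Int) m =>
      let ndp0 := (PySem.List.pyRange 0 (B+1) 1).foldl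
        (fun l i => PySem.List.pySetD l i 0) st.2
      let p := pvAinner (PySem.List.pyRange 0 (B+1) 1) m B st.1 ndp0
      if m < A then (p.2, p.1) else (p.1, p.2))
    (dp, ndp)
  PySem.List.pyGetD st.1 B 0

-- ===== PORT B =====
def solveStressFree_alt (A : Int) (B : Int) : Int :=
  if B = 0 then 1
  else if A ≤ B then 0
  else
    let col0 := List.replicate (A+1).toNat 1
    let col := (PySem.List.pyRange 1 (B+1) 1).foldl
      (fun col j =>
        ((PySem.List.pyRange (j+1) (A+1) 1).foldl
          (fun (p : Int × List Int) m =>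
            let s := (p.1 + PySem.List.pyGetD p.2 m 0) % pvMOD
            (s, PySem.List.pySetD p.2 m s))
          (0, col)).2)
      col0
    PySem.List.pyGetD col A 0

-- ===== PRECONDITION & SPEC =====
-- Pre_ excludes B < 0, on which Python A raises IndexError (dp is empty, dp[0] = 1 fails).
def Pre_solveStressFree (A : Int) (B : Int) : Prop := 0 ≤ B
instance (A : Int) (B : Int) : Decidable (Pre_solveStressFree A B) := by
  unfold Pre_solveStressFree; infer_instance

def pvWitness_solveStressFree : Int × Int := (5, 3)

def Spec_solveStressFree (A : Int) (B : Int) (out : Int) : Prop := out = solveStressFree_alt A B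
instance (A : Int) (B : Int) (out : Int) : Decidable (Spec_solveStressFree A B out) := by
  unfold Spec_solveStressFree; infer_instance

-- ===== CLAIM (what is proved, stated in full; the proofs are below) =====
def Claim_equal_solveStressFree : Prop := ∀ (A : Int) (B : Int), Dom_solveStressFree A B → Pre_solveStressFree A B → Spec_solveStressFree A B (solveStressFree A B)

-- ===== LEMMAS AND PROOFS =====

-- the common mathematical value: pvG m j = number (mod pvMOD) of strictly-ahead score
-- sequences ending at my-score m, opponent-score j (0 when m ≤ j unless j = 0)
def pvG : Nat → Nat → Int
  | _, 0 => 1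
  | m, j+1 => if m ≤ j + 1 then 0 else (pvG (m-1) (j+1) + pvG m j) % pvMOD
termination_by m j => m + j
decreasing_by all_goals omega

lemma pvG_zero (m : Nat) : pvG m 0 = 1 := by rw [pvG]

lemma pvG_eq_zero {m j : Nat} (h1 : m ≤ j) (h2 : 1 ≤ j) : pvG m j = 0 := by
  obtain ⟨jj, rfl⟩ : ∃ jj, j = jj + 1 := ⟨j - 1, by omega⟩
  rw [pvG]; simp [h1]

lemma pvG_succ {m j : Nat} (h : j < m) (hj : 1 ≤ j) :
    pvG m j = (pvG (m-1) j + pvG m (j-1)) % pvMOD := by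
  obtain ⟨jj, rfl⟩ : ∃ jj, j = jj + 1 := ⟨j - 1, by omega⟩
  rw [pvG]; simp [Nat.not_le.mpr h]

lemma pvG_bounds (m j : Nat) : 0 ≤ pvG m j ∧ pvG m j < pvMOD := by
  cases j with
  | zero => rw [pvG_zero]; constructor <;> norm_num [pvMOD]
  | succ jj =>
    rw [pvG]
    split
    · constructor <;> norm_num [pvMOD]
    · exact ⟨Int.emod_nonneg _ (by norm_num [pvMOD]),
        Int.emod_lt_of_pos _ (by norm_num [pvMOD])⟩

lemma pvG_mod (m j : Nat) : pvG m j % pvMOD = pvG m j :=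
  Int.emod_eq_of_lt (pvG_bounds m j).1 (pvG_bounds m j).2

lemma pvGetD_set (l : List Int) (k j : Nat) (v : Int) (hk : k < l.length) :
    (l.set k v).getD j 0 = if j = k then v else l.getD j 0 := by
  rw [List.getD_eq_getElem?_getD, List.getD_eq_getElem?_getD, List.getElem?_set]
  by_cases h : j = k
  · subst h; simp [hk]
  · simp [Ne.symm h, h]

-- A's inner loop turns dp = row (m-1) into row m in place and fills ndp with row m
lemma pvAinner_spec (m B : Nat) (hm : 1 ≤ m) :
    ∀ (k o : Nat), o + k = B + 1 → o ≤ m →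
    ∀ (dp ndp : List Int), dp.length = B + 1 → ndp.length = B + 1 →
    (∀ j : Nat, j ≤ B → dp.getD j 0 = if j ≤ o then pvG m j else pvG (m-1) j) →
    (∀ j : Nat, j ≤ B → ndp.getD j 0 = if j < o then pvG m j else 0) →
    (pvAinner (PySem.List.pyRange (o : Int) ((B : Int) + 1) 1) (m : Int) (B : Int) dp ndp).1.length = B + 1 ∧
    (pvAinner (PySem.List.pyRange (o : Int) ((B : Int) + 1) 1) (m : Int) (B : Int) dp ndp).2.length = B + 1 ∧
    (∀ j : Nat, j ≤ B → (pvAinner (PySem.List.pyRange (o : Int) ((B : Int) + 1) 1) (m : Int) (B : Int) dp ndp).1.getD j 0 = pvG m j) ∧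
    (∀ j : Nat, j ≤ B → (pvAinner (PySem.List.pyRange (o : Int) ((B : Int) + 1) 1) (m : Int) (B : Int) dp ndp).2.getD j 0 = pvG m j) := by
  intro k
  induction k with
  | zero =>
    intro o hk ho dp ndp hld hln hdp hndp
    rw [PySem.List.pyRange_one_eq_nil (by push_cast; omega)]
    simp only [pvAinner]
    refine ⟨hld, hln, fun j hj => ?_, fun j hj => ?_⟩
    · rw [hdp j hj, if_pos (by omega)]
    · rw [hndp j hj, if_pos (by omega)]
  | succ k ih =>
    intro o hk ho dp ndp hld hln hdp hndp
    rw [PySem.List.pyRange_one_cons (by push_cast; omega)]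
    by_cases hbreak : m = o
    · simp only [pvAinner, if_pos (show (m : Int) ≤ (o : Int) by exact_mod_cast Nat.le_of_eq hbreak)]
      refine ⟨hld, hln, fun j hj => ?_, fun j hj => ?_⟩
      · rw [hdp j hj]
        split_ifs with h
        · rfl
        · rw [pvG_eq_zero (by omega) (by omega), pvG_eq_zero (by omega) (by omega)]
      · rw [hndp j hj]
        split_ifs with h
        · rfl
        · rw [pvG_eq_zero (by omega) (by omega)]
    · have hom : o < m := by omega
      simp only [pvAinner, if_neg (show ¬ (m : Int) ≤ (o : Int) by push_cast; omega)]
      rw [show ((o : Int) + 1) = ((o + 1 : Nat) : Int) by push_cast; ring]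
      simp only [PySem.List.pySetD_natCast, PySem.List.pyGetD_natCast]
      by_cases hc : (((o + 1 : Nat) : Int) < (m : Int) ∧ (o : Int) < (B : Int))
      · have hoB : o < B := by exact_mod_cast hc.2
        have ho1m : o + 1 < m := by exact_mod_cast hc.1
        have hval : pvG m (o+1) = (pvG (m-1) (o+1) + pvG m o) % pvMOD := by
          rw [pvG_succ (by omega) (by omega), Nat.add_sub_cancel]
        rw [if_pos hc, hdp (o+1) (by omega), if_neg (by omega), hdp o (by omega),
          if_pos (le_refl o), ← hval]
        have hdp' : ∀ j : Nat, j ≤ B →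
            (dp.set (o+1) (pvG m (o+1))).getD j 0
              = if j ≤ o + 1 then pvG m j else pvG (m-1) j := by
          intro j hj
          rw [pvGetD_set _ _ _ _ (by omega)]
          by_cases h1 : j = o + 1
          · rw [if_pos h1, if_pos (by omega), h1]
          · rw [if_neg h1, hdp j hj]
            split_ifs with h2 h3 <;> first | rfl | omega
        rw [hndp o (by omega), if_neg (by omega), hdp' o (by omega), if_pos (by omega),
          zero_add, pvG_mod]
        refine ih (o+1) (by omega) (by omega) _ _ (by simp [hld]) (by simp [hln]) hdp' ?_
        intro j hj
        rw [pvGetD_set _ _ _ _ (by omega)]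
        by_cases h1 : j = o
        · rw [if_pos h1, if_pos (by omega), h1]
        · rw [if_neg h1, hndp j hj]
          split_ifs with h2 h3 <;> first | rfl | omega
      · rw [if_neg hc]
        have hdp' : ∀ j : Nat, j ≤ B →
            dp.getD j 0 = if j ≤ o + 1 then pvG m j else pvG (m-1) j := by
          intro j hj
          rw [hdp j hj]
          by_cases h1 : j = o + 1
          · have hmo : o + 1 = m := by
              rcases not_and_or.mp hc with h | h
              · push_cast at h; omega
              · exfalso; push_cast at h; omega
            rw [if_neg (by omega), if_pos (by omega), h1, hmo,
              pvG_eq_zero (le_refl m) (by omega), pvG_eq_zero (by omega) (by omega)]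
          · split_ifs with h2 h3 <;> first | rfl | omega
        rw [hndp o (by omega), if_neg (by omega), hdp o (by omega), if_pos (le_refl o),
          zero_add, pvG_mod]
        refine ih (o+1) (by omega) (by omega) _ _ hld (by simp [hln]) hdp' ?_
        intro j hj
        rw [pvGetD_set _ _ _ _ (by omega)]
        by_cases h1 : j = o
        · rw [if_pos h1, if_pos (by omega), h1]
        · rw [if_neg h1, hndp j hj]
          split_ifs with h2 h3 <;> first | rfl | omega

-- the reset loop 'for i in range(B+1): ndp[i] = 0'
lemma pvReset : ∀ (n : Nat) (l : List Int), n ≤ l.length →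
    ((PySem.List.pyRange 0 (n : Int) 1).foldl (fun t i => PySem.List.pySetD t i 0) l).length = l.length ∧
    (∀ j : Nat, j < n →
      ((PySem.List.pyRange 0 (n : Int) 1).foldl (fun t i => PySem.List.pySetD t i 0) l).getD j 0 = 0) := by
  intro n
  induction n with
  | zero =>
    intro l _
    rw [PySem.List.pyRange_one_eq_nil (by omega)]
    exact ⟨rfl, fun j hj => absurd hj (by omega)⟩
  | succ n ih =>
    intro l hn
    have hcast : ((n + 1 : Nat) : Int) = (n : Int) + 1 := by push_cast; ring
    rw [hcast, PySem.List.pyRange_one_succ_right (by omega), List.foldl_append]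
    simp only [List.foldl_cons, List.foldl_nil]
    obtain ⟨hlen, hval⟩ := ih l (by omega)
    rw [PySem.List.pySetD_natCast]
    refine ⟨by simp [hlen], fun j hj => ?_⟩
    rw [pvGetD_set _ _ _ _ (by omega)]
    split_ifs with h
    · rfl
    · exact hval j (by omega)

-- A's outer loop invariant: dp holds row (a-1) before round a
lemma pvAouter (B ANat : Nat) (A : Int) (hA : A = (ANat : Int)) :
    ∀ (k a : Nat), 1 ≤ a → a + k = ANat + 1 →
    ∀ (dp ndp : List Int), dp.length = B + 1 → ndp.length = B + 1 →
    (∀ j : Nat, j ≤ B → dp.getD j 0 = pvG (a-1) j) →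
    (((PySem.List.pyRange (a : Int) (A + 1) 1).foldl
      (fun (st : List Int × List Int) m =>
        let ndp0 := (PySem.List.pyRange 0 ((B : Int) + 1) 1).foldl
          (fun l i => PySem.List.pySetD l i 0) st.2
        let p := pvAinner (PySem.List.pyRange 0 ((B : Int) + 1) 1) m (B : Int) st.1 ndp0
        if m < A then (p.2, p.1) else (p.1, p.2))
      (dp, ndp)).1.length = B + 1) ∧
    (∀ j : Nat, j ≤ B →
      ((PySem.List.pyRange (a : Int) (A + 1) 1).foldl
        (fun (st : List Int × List Int) m =>
          let ndp0 := (PySem.List.pyRange 0 ((B : Int) + 1) 1).foldl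
            (fun l i => PySem.List.pySetD l i 0) st.2
          let p := pvAinner (PySem.List.pyRange 0 ((B : Int) + 1) 1) m (B : Int) st.1 ndp0
          if m < A then (p.2, p.1) else (p.1, p.2))
        (dp, ndp)).1.getD j 0 = pvG ANat j) := by
  subst hA
  intro k
  induction k with
  | zero =>
    intro a ha hk dp ndp hld hln hdp
    rw [show PySem.List.pyRange (a : Int) ((ANat : Int) + 1) 1 = []
      from PySem.List.pyRange_one_eq_nil (by push_cast; omega)]
    simp only [List.foldl_nil]
    exact ⟨hld, fun j hj => by rw [hdp j hj, show a - 1 = ANat by omega]⟩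
  | succ k ih =>
    intro a ha hk dp ndp hld hln hdp
    rw [show PySem.List.pyRange (a : Int) ((ANat : Int) + 1) 1
        = (a : Int) :: PySem.List.pyRange ((a : Int) + 1) ((ANat : Int) + 1) 1
      from PySem.List.pyRange_one_cons (by push_cast; omega)]
    simp only [List.foldl_cons]
    obtain ⟨hr0len, hr0val⟩ := pvReset (B+1) ndp (by omega)
    have hr0len' : ((PySem.List.pyRange 0 ((B : Int) + 1) 1).foldl
        (fun l i => PySem.List.pySetD l i 0) ndp).length = B + 1 := by
      rw [show ((B : Int) + 1) = ((B + 1 : Nat) : Int) by push_cast; ring]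
      rw [hr0len, hln]
    have hspec := pvAinner_spec a B (by omega) (B+1) 0 (by omega) (by omega) dp
      ((PySem.List.pyRange 0 ((B : Int) + 1) 1).foldl (fun l i => PySem.List.pySetD l i 0) ndp)
      hld hr0len'
      (by
        intro j hj
        rw [hdp j hj]
        by_cases h0 : j = 0
        · subst h0; rw [if_pos (le_refl 0), pvG_zero, pvG_zero]
        · rw [if_neg (by omega)])
      (by
        intro j hj
        rw [if_neg (by omega)]
        rw [show ((B : Int) + 1) = ((B + 1 : Nat) : Int) by push_cast; ring]
        exact hr0val j (by omega))
    simp only [Nat.cast_zero] at hspec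
    obtain ⟨hp1len, hp2len, hp1, hp2⟩ := hspec
    rw [show ((a : Int) + 1) = ((a + 1 : Nat) : Int) by push_cast; ring]
    by_cases hlt : (a : Int) < (ANat : Int)
    · rw [if_pos hlt]
      refine ih (a+1) (by omega) (by omega) _ _ hp2len hp1len ?_
      intro j hj
      rw [Nat.add_sub_cancel]
      exact hp2 j hj
    · rw [if_neg hlt]
      refine ih (a+1) (by omega) (by omega) _ _ hp1len hp2len ?_
      intro j hj
      rw [Nat.add_sub_cancel]
      exact hp1 j hj

-- B's inner loop: running prefix sums produce column j from column (j-1)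
lemma pvBinner (ANat j : Nat) (hj : 1 ≤ j) :
    ∀ (k mstart : Nat), mstart + k = ANat + 1 → j + 1 ≤ mstart →
    ∀ (s : Int) (col : List Int), col.length = ANat + 1 →
    s = pvG (mstart - 1) j →
    (∀ t : Nat, t ≤ ANat → mstart ≤ t → col.getD t 0 = pvG t (j-1)) →
    (∀ t : Nat, j + 1 ≤ t → t < mstart → t ≤ ANat → col.getD t 0 = pvG t j) →
    (((PySem.List.pyRange (mstart : Int) ((ANat : Int) + 1) 1).foldl
      (fun (p : Int × List Int) m =>
        let s := (p.1 + PySem.List.pyGetD p.2 m 0) % pvMOD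
        (s, PySem.List.pySetD p.2 m s))
      (s, col)).2.length = ANat + 1) ∧
    (∀ t : Nat, j + 1 ≤ t → t ≤ ANat →
      ((PySem.List.pyRange (mstart : Int) ((ANat : Int) + 1) 1).foldl
        (fun (p : Int × List Int) m =>
          let s := (p.1 + PySem.List.pyGetD p.2 m 0) % pvMOD
          (s, PySem.List.pySetD p.2 m s))
        (s, col)).2.getD t 0 = pvG t j) := by
  intro k
  induction k with
  | zero =>
    intro mstart hk hms s col hlen hs hcolA hcolB
    rw [show PySem.List.pyRange (mstart : Int) ((ANat : Int) + 1) 1 = []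
      from PySem.List.pyRange_one_eq_nil (by push_cast; omega)]
    simp only [List.foldl_nil]
    exact ⟨hlen, fun t ht1 ht2 => hcolB t ht1 (by omega) ht2⟩
  | succ k ih =>
    intro mstart hk hms s col hlen hs hcolA hcolB
    rw [show PySem.List.pyRange (mstart : Int) ((ANat : Int) + 1) 1
        = (mstart : Int) :: PySem.List.pyRange ((mstart : Int) + 1) ((ANat : Int) + 1) 1
      from PySem.List.pyRange_one_cons (by push_cast; omega)]
    simp only [List.foldl_cons, PySem.List.pySetD_natCast, PySem.List.pyGetD_natCast]
    have hs' : (s + col.getD mstart 0) % pvMOD = pvG mstart j := by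
      rw [hcolA mstart (by omega) (le_refl _), hs]
      exact (pvG_succ (by omega) (by omega)).symm
    rw [show ((mstart : Int) + 1) = ((mstart + 1 : Nat) : Int) by push_cast; ring, hs']
    refine ih (mstart + 1) (by omega) (by omega) (pvG mstart j) _ (by simp [hlen])
      (by rw [Nat.add_sub_cancel]) ?_ ?_
    · intro t ht hmt
      rw [pvGetD_set _ _ _ _ (by omega), if_neg (by omega)]
      exact hcolA t ht (by omega)
    · intro t ht1 ht2 ht3
      rw [pvGetD_set _ _ _ _ (by omega)]
      by_cases h : t = mstart
      · rw [if_pos h, h]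
      · rw [if_neg h]
        exact hcolB t ht1 (by omega) ht3

-- B's outer loop invariant: col holds column (j-1) (at rows ≥ j) before column j
lemma pvBouter (ANat : Nat) (BNat : Nat) (hBA : BNat < ANat) :
    ∀ (k j : Nat), 1 ≤ j → j + k = BNat + 1 →
    ∀ (col : List Int), col.length = ANat + 1 →
    (∀ t : Nat, j ≤ t → t ≤ ANat → col.getD t 0 = pvG t (j-1)) →
    (((PySem.List.pyRange (j : Int) ((BNat : Int) + 1) 1).foldl
      (fun col jj =>
        ((PySem.List.pyRange (jj+1) ((ANat : Int) + 1) 1).foldl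
          (fun (p : Int × List Int) m =>
            let s := (p.1 + PySem.List.pyGetD p.2 m 0) % pvMOD
            (s, PySem.List.pySetD p.2 m s))
          (0, col)).2)
      col).length = ANat + 1) ∧
    (∀ t : Nat, BNat + 1 ≤ t → t ≤ ANat →
      ((PySem.List.pyRange (j : Int) ((BNat : Int) + 1) 1).foldl
        (fun col jj =>
          ((PySem.List.pyRange (jj+1) ((ANat : Int) + 1) 1).foldl
            (fun (p : Int × List Int) m =>
              let s := (p.1 + PySem.List.pyGetD p.2 m 0) % pvMOD
              (s, PySem.List.pySetD p.2 m s))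
            (0, col)).2)
        col).getD t 0 = pvG t BNat) := by
  intro k
  induction k with
  | zero =>
    intro j hj hk col hlen hcol
    rw [show PySem.List.pyRange (j : Int) ((BNat : Int) + 1) 1 = []
      from PySem.List.pyRange_one_eq_nil (by push_cast; omega)]
    simp only [List.foldl_nil]
    refine ⟨hlen, fun t ht1 ht2 => ?_⟩
    have := hcol t (by omega) ht2
    rwa [show j - 1 = BNat by omega] at this
  | succ k ih =>
    intro j hj hk col hlen hcol
    rw [show PySem.List.pyRange (j : Int) ((BNat : Int) + 1) 1
        = (j : Int) :: PySem.List.pyRange ((j : Int) + 1) ((BNat : Int) + 1) 1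
      from PySem.List.pyRange_one_cons (by push_cast; omega)]
    simp only [List.foldl_cons]
    rw [show ((j : Int) + 1) = ((j + 1 : Nat) : Int) by push_cast; ring]
    obtain ⟨hl', hv'⟩ := pvBinner ANat j hj (ANat - j) (j + 1) (by omega) (by omega) 0 col hlen
      (by rw [Nat.add_sub_cancel]; exact (pvG_eq_zero (le_refl j) hj).symm)
      (fun t ht hmt => hcol t (by omega) ht)
      (fun t ht1 ht2 ht3 => absurd ht2 (by omega))
    refine ih (j + 1) (by omega) (by omega) _ hl' ?_
    intro t ht1 ht2
    rw [Nat.add_sub_cancel]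
    exact hv' t (by omega) ht2

lemma pvPortA_eq (A B : Int) (hB : 0 ≤ B) :
    solveStressFree A B = pvG A.toNat B.toNat := by
  obtain ⟨BN, rfl⟩ : ∃ n : Nat, B = (n : Int) := ⟨B.toNat, (Int.toNat_of_nonneg hB).symm⟩
  simp only [solveStressFree]
  rw [show ((BN : Int) + 1).toNat = BN + 1 by omega,
    show PySem.List.pySetD (List.replicate (BN+1) (0:Int)) 0 1
        = (List.replicate (BN+1) (0:Int)).set 0 1
      from by rw [PySem.List.pySetD_of_nonneg _ _ (by norm_num)]; norm_num]
  have hdp0len : ((List.replicate (BN+1) (0:Int)).set 0 1).length = BN + 1 := by simp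
  have hdp0val : ∀ j : Nat, j ≤ BN →
      ((List.replicate (BN+1) (0:Int)).set 0 1).getD j 0 = pvG 0 j := by
    intro j hj
    rw [pvGetD_set _ _ _ _ (by simp)]
    by_cases h : j = 0
    · rw [if_pos h, h, pvG_zero]
    · rw [if_neg h, pvG_eq_zero (by omega) (by omega)]
      simp [List.getD_eq_getElem?_getD, hj]
  by_cases hA : A ≤ 0
  · rw [show PySem.List.pyRange 1 (A + 1) 1 = []
      from PySem.List.pyRange_one_eq_nil (by omega)]
    simp only [List.foldl_nil]
    rw [PySem.List.pyGetD_natCast, hdp0val BN (le_refl _),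
      show A.toNat = 0 by omega, Int.toNat_natCast]
  · rw [not_le] at hA
    obtain ⟨AN, rfl⟩ : ∃ n : Nat, A = (n : Int) := ⟨A.toNat, (Int.toNat_of_nonneg (by omega)).symm⟩
    obtain ⟨hlen, hval⟩ := pvAouter BN AN (AN : Int) rfl AN 1 (le_refl 1) (by omega)
      ((List.replicate (BN+1) (0:Int)).set 0 1) (List.replicate (BN+1) 0)
      hdp0len (by simp) (fun j hj => hdp0val j hj)
    simp only [Nat.cast_one] at hval
    rw [PySem.List.pyGetD_natCast, hval BN (le_refl _), Int.toNat_natCast, Int.toNat_natCast]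

lemma pvPortB_eq (A B : Int) (hB : 0 ≤ B) :
    solveStressFree_alt A B = pvG A.toNat B.toNat := by
  obtain ⟨BN, rfl⟩ : ∃ n : Nat, B = (n : Int) := ⟨B.toNat, (Int.toNat_of_nonneg hB).symm⟩
  simp only [solveStressFree_alt]
  by_cases hB0 : (BN : Int) = 0
  · rw [if_pos hB0, Int.toNat_natCast, show BN = 0 by exact_mod_cast hB0, pvG_zero]
  · rw [if_neg hB0]
    by_cases hAB : A ≤ (BN : Int)
    · rw [if_pos hAB, Int.toNat_natCast,
        pvG_eq_zero (by omega) (by omega)]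
    · rw [if_neg hAB]
      obtain ⟨AN, rfl⟩ : ∃ n : Nat, A = (n : Int) := ⟨A.toNat, (Int.toNat_of_nonneg (by omega)).symm⟩
      have hBA : BN < AN := by exact_mod_cast not_le.mp hAB
      rw [show ((AN : Int) + 1).toNat = AN + 1 by omega]
      have hinit : ∀ t : Nat, 1 ≤ t → t ≤ AN →
          (List.replicate (AN+1) (1:Int)).getD t 0 = pvG t (1 - 1) := by
        intro t ht1 ht2
        rw [show (1:Nat) - 1 = 0 from rfl, pvG_zero]
        simp [List.getD_eq_getElem?_getD, ht2]
      obtain ⟨hlen, hval⟩ := pvBouter AN BN hBA BN 1 (le_refl 1) (by omega)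
        (List.replicate (AN+1) 1) (by simp) hinit
      simp only [Nat.cast_one] at hval
      rw [PySem.List.pyGetD_natCast, hval AN (by omega) (le_refl _),
        Int.toNat_natCast, Int.toNat_natCast]

-- ===== VERDICT (by name: the statement is the Claim_ definition above) =====
theorem solveStressFree_spec : Claim_equal_solveStressFree := by
  intro A B _ hPre
  unfold Spec_solveStressFree
  rw [pvPortA_eq A B hPre, pvPortB_eq A B hPre]
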